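-- pv_equiv track=rewrite | github.com/DNYoussef/AIVillage | fix_critical_issues.py | fix_common_issues
-- ===== SOURCE A (Python) =====
-- def fix_common_issues(content: str) -> str:
--     """Fix common linting issues."""
--     # Remove trailing whitespace
--     lines = [line.rstrip() for line in content.split('\n')]
--
--     # Ensure file ends with newline
--     if lines and lines[-1]:
--         lines.append('')
--
--     # Remove multiple consecutive blank lines
--     fixed_lines = []
--     blank_count = 0
--
--     for line in lines:
--         if not line.strip():
--             blank_count += 1
--             if blank_count <= 2:  # Allow max 2 consecutive blank lines
--                 fixed_lines.append(line)
--         else: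
--             blank_count = 0
--             fixed_lines.append(line)
--
--     return '\n'.join(fixed_lines)
-- ===== SOURCE B (Python) =====
-- def fix_common_issues(content: str) -> str:
--     """Fix common linting issues (stateless lookback filter instead of a blank counter)."""
--     lines = [line.rstrip() for line in content.split('\n')]
--     if lines and lines[-1]:
--         lines.append('')
--     kept = [line for i, line in enumerate(lines)
--             if line or i < 2 or lines[i - 1] or lines[i - 2]]
--     return '\n'.join(kept)
-- ===== Notes on version B (the rewrite author's own statement) =====
-- stated objective: alternative
-- what changed: Replaces A's stateful blank_count accumulator loop with a stateless comprehension over enumerate(lines) that keeps a line unless it and its two predecessors (looked up by index) are all blank; the blank test becomes the direct truthiness of the already-rstripped line instead of re-stripping each line.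
import Mathlib
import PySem

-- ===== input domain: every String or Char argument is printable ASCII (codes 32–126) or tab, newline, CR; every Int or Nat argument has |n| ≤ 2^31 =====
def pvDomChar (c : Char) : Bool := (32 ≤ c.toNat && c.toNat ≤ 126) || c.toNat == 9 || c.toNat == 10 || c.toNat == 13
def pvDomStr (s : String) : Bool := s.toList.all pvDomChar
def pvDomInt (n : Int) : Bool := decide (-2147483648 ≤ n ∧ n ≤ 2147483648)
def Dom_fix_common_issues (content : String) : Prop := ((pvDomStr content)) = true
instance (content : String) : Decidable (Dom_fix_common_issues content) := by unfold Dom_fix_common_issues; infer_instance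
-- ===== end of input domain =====

-- B replaces A's stateful blank_count loop by a stateless index-lookback filter
-- (keep a line unless it and its two predecessors are blank); objective: alternative decomposition.

-- ===== PORT A =====
-- the for-loop over lines, carrying blank_count; emits fixed_lines in order
def pvBlankLoop : List String → Int → List String
  | [], _ => []
  | line :: rest, blankCount =>
    if PySem.Str.strip line == "" then
      if blankCount + 1 ≤ 2 then line :: pvBlankLoop rest (blankCount + 1)
      else pvBlankLoop rest (blankCount + 1)
    else line :: pvBlankLoop rest 0

def fix_common_issues (content : String) : String :=
  let lines := ((PySem.Str.split? content "\n").getD []).map PySem.Str.rstrip  -- sep "\n" ≠ "", so split? is `some`: getD is exact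
  let lines := if !lines.isEmpty && ((PySem.List.pyGet? lines (-1)).getD "" != "") then lines ++ [""] else lines
  PySem.Str.join "\n" (pvBlankLoop lines 0)

-- ===== PORT B =====
def fix_common_issues_alt (content : String) : String :=
  let lines := ((PySem.Str.split? content "\n").getD []).map PySem.Str.rstrip  -- sep "\n" ≠ "", so split? is `some`: getD is exact
  let lines := if !lines.isEmpty && ((PySem.List.pyGet? lines (-1)).getD "" != "") then lines ++ [""] else lines
  -- the comprehension: `lines[i-1]`/`lines[i-2]` only influence the kept set when 2 ≤ i
  -- (Python's `or` short-circuits on `i < 2`), where they are in range, so pyGetD is exact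
  let kept := ((PySem.List.enumerate lines).filter (fun il =>
      il.2 != "" || decide (il.1 < 2) ||
      PySem.List.pyGetD lines (il.1 - 1) "" != "" ||
      PySem.List.pyGetD lines (il.1 - 2) "" != "")).map Prod.snd
  PySem.Str.join "\n" kept

-- ===== PRECONDITION & SPEC =====
def Spec_fix_common_issues (content : String) (out : String) : Prop := out = fix_common_issues_alt content
instance (content : String) (out : String) : Decidable (Spec_fix_common_issues content out) := by unfold Spec_fix_common_issues; infer_instance

-- ===== CLAIM (what is proved, stated in full; the proofs are below) =====
def Claim_equal_fix_common_issues : Prop := ∀ (content : String), Dom_fix_common_issues content → Spec_fix_common_issues content (fix_common_issues content)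

-- ===== LEMMAS AND PROOFS =====

-- common reference form of both loops: a two-line blank lookback carried as two Booleans
def pvKeepRec : Bool → Bool → List String → List String
  | _, _, [] => []
  | p2, p1, l :: ls =>
    if l == "" then
      (if p1 && p2 then pvKeepRec p1 true ls else l :: pvKeepRec p1 true ls)
    else l :: pvKeepRec p1 false ls

-- "position k - j exists and holds a blank line"
def pvPB (lines : List String) (k j : Nat) : Bool := decide (j ≤ k) && (lines.getD (k - j) "x" == "")

-- an rstripped string is all-whitespace only if it is empty
lemma pv_strip_rstrip_nil (cs : List Char) :
    (PySem.Chars.strip (PySem.Chars.rstrip cs) = []) ↔ (PySem.Chars.rstrip cs = []) := by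
  constructor
  · intro h
    by_contra hne
    set t := List.dropWhile PySem.Chars.isspace cs.reverse with ht
    have htne : t ≠ [] := by
      intro h0
      apply hne
      simp [PySem.Chars.rstrip, ← ht, h0]
    obtain ⟨a, t', hat⟩ := List.exists_cons_of_ne_nil htne
    have ha : ¬ PySem.Chars.isspace a = true := by
      have h' := List.head_dropWhile_not (p := PySem.Chars.isspace) (l := cs.reverse)
        (by rw [← ht]; exact htne)
      simp only [← ht, hat, List.head_cons] at h'
      simp [h']
    have hr : PySem.Chars.rstrip cs = t.reverse := by simp [PySem.Chars.rstrip, ← ht]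
    rw [hr, hat] at h
    simp only [PySem.Chars.strip, PySem.Chars.lstrip, PySem.Chars.rstrip,
      List.reverse_cons, List.dropWhile_append] at h
    by_cases he : (List.dropWhile PySem.Chars.isspace t'.reverse).isEmpty
    · rw [if_pos he] at h
      simp [List.dropWhile_cons_of_neg ha] at h
    · rw [if_neg he] at h
      rw [List.reverse_append] at h
      simp only [List.reverse_cons, List.reverse_nil, List.nil_append, List.singleton_append] at h
      rw [List.dropWhile_cons_of_neg ha] at h
      simp at h
  · intro h
    rw [h]
    rfl

lemma pv_ofList_eq_empty_iff (cs : List Char) : String.ofList cs = "" ↔ cs = [] := by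
  constructor
  · intro h
    have := congrArg String.toList h
    simpa using this
  · intro h; simp [h]

lemma pv_strip_rstrip_beq (x : String) :
    (PySem.Str.strip (PySem.Str.rstrip x) == "") = ((PySem.Str.rstrip x) == "") := by
  have h1 : (PySem.Str.strip (PySem.Str.rstrip x) = "") ↔ (PySem.Str.rstrip x = "") := by
    simp only [PySem.Str.strip, PySem.Str.rstrip, String.toList_ofList, pv_ofList_eq_empty_iff]
    exact pv_strip_rstrip_nil x.toList
  by_cases hb : PySem.Str.rstrip x = ""
  · simp only [hb, beq_self_eq_true]
    have h0 : PySem.Str.strip "" = "" := rfl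
    simp [h0]
  · have h2 : ¬ PySem.Str.strip (PySem.Str.rstrip x) = "" := fun h => hb (h1.mp h)
    simp [hb, h2]

-- A-side: the blank_count loop equals the two-Boolean lookback recursion
lemma pv_aloop_eq_keepRec (ls : List String)
    (h : ∀ l ∈ ls, (PySem.Str.strip l == "") = (l == "")) :
    ∀ (bc : Int) (p1 p2 : Bool), 0 ≤ bc →
      decide (1 ≤ bc) = p1 → decide (2 ≤ bc) = (p1 && p2) →
      pvBlankLoop ls bc = pvKeepRec p2 p1 ls := by
  induction ls with
  | nil => intro bc p1 p2 _ _ _; rfl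
  | cons l ls ih =>
    intro bc p1 p2 hbc h1 h2
    have hmem : ∀ x ∈ ls, (PySem.Str.strip x == "") = (x == "") := fun x hx => h x (List.mem_cons_of_mem _ hx)
    have hl := h l (List.mem_cons_self)
    rw [pvBlankLoop, pvKeepRec, hl]
    by_cases hb : l == ""
    · rw [if_pos hb, if_pos hb]
      have hrec := ih hmem (bc + 1) true p1 (by omega)
        (by simp only [decide_eq_true_eq]; omega)
        (by simp only [Bool.true_and]; rw [← h1]; simp only [decide_eq_decide]; omega)
      by_cases h12 : p1 && p2
      · have hc : ¬ bc + 1 ≤ 2 := by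
          have h3 := h2; rw [h12] at h3; simp only [decide_eq_true_eq] at h3; omega
        rw [if_neg hc, if_pos h12, hrec]
      · have hc : bc + 1 ≤ 2 := by
          have h3 := h2; rw [eq_false_of_ne_true h12] at h3
          simp only [decide_eq_false_iff_not, not_le] at h3; omega
        rw [if_pos hc, if_neg h12, hrec]
    · rw [if_neg hb, if_neg hb]
      rw [ih hmem 0 false p1 le_rfl (by simp) (by simp)]

-- the comprehension's keep-test, at a valid index, is the two-Boolean lookback condition
lemma pv_cond_eq (lines : List String) (k : Nat) (hk : k < lines.length) :
    ((lines[k] != "" || decide ((k : Int) < 2) ||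
      PySem.List.pyGetD lines ((k : Int) - 1) "" != "" ||
      PySem.List.pyGetD lines ((k : Int) - 2) "" != "")) =
    !((lines[k] == "") && pvPB lines k 1 && pvPB lines k 2) := by
  match k with
  | 0 => simp [pvPB]
  | 1 => simp [pvPB]
  | (n+2) =>
    have e1 : ((n+2 : Nat) : Int) - 1 = ((n+1 : Nat) : Int) := by push_cast; ring
    have e2 : ((n+2 : Nat) : Int) - 2 = ((n : Nat) : Int) := by push_cast; ring
    rw [e1, e2, PySem.List.pyGetD_natCast, PySem.List.pyGetD_natCast]
    have hd1 : lines.getD (n+1) "" = lines[n+1] := List.getD_eq_getElem _ _ (by omega)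
    have hd2 : lines.getD n "" = lines[n] := List.getD_eq_getElem _ _ (by omega)
    have hp1 : pvPB lines (n+2) 1 = (lines[n+1] == "") := by
      simp only [pvPB]
      rw [show n + 2 - 1 = n + 1 by omega, List.getD_eq_getElem _ _ (by omega)]
      simp
    have hp2 : pvPB lines (n+2) 2 = (lines[n] == "") := by
      simp only [pvPB]
      rw [show n + 2 - 2 = n by omega, List.getD_eq_getElem _ _ (by omega)]
      simp
    rw [hd1, hd2, hp1, hp2]
    have hdec : decide (((n+2 : Nat) : Int) < 2) = false := by simp; omega
    rw [hdec]
    cases hb0 : lines[n+2] == "" <;> cases hb1 : lines[n+1] == "" <;> cases hb2 : lines[n] == "" <;>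
      simp [bne, hb0, hb1, hb2]

-- B-side: the filtered enumeration, from position k on, equals the lookback recursion
lemma pv_filt_eq_keepRec (lines : List String) :
    ∀ (n k : Nat), lines.length - k = n →
    ((PySem.List.enumerate (lines.drop k) (k : Int)).filter (fun il =>
        il.2 != "" || decide (il.1 < 2) ||
        PySem.List.pyGetD lines (il.1 - 1) "" != "" ||
        PySem.List.pyGetD lines (il.1 - 2) "" != "")).map Prod.snd
      = pvKeepRec (pvPB lines k 2) (pvPB lines k 1) (lines.drop k) := by
  intro n
  induction n with
  | zero =>
    intro k hk
    have h0 : lines.drop k = [] := List.drop_eq_nil_of_le (by omega)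
    rw [h0]
    rfl
  | succ n ih =>
    intro k hk
    have hklt : k < lines.length := by omega
    have hdrop : lines.drop k = lines[k] :: lines.drop (k + 1) := by
      rw [List.getElem_cons_drop]
    have hcast : (k : Int) + 1 = ((k + 1 : Nat) : Int) := by push_cast; ring
    have hih := ih (k + 1) (by omega)
    have hp1 : pvPB lines (k + 1) 1 = (lines[k] == "") := by
      simp only [pvPB]
      rw [show k + 1 - 1 = k by omega, List.getD_eq_getElem _ _ hklt]
      simp
    have hp2 : pvPB lines (k + 1) 2 = pvPB lines k 1 := by
      simp only [pvPB]
      rw [show k + 1 - 2 = k - 1 by omega]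
      by_cases h1 : 1 ≤ k
      · rw [show (decide (2 ≤ k + 1)) = true by simp only [decide_eq_true_eq]; omega,
           show (decide (1 ≤ k)) = true by simp only [decide_eq_true_eq]; omega]
      · rw [show (decide (2 ≤ k + 1)) = false by simp only [decide_eq_false_iff_not]; omega,
           show (decide (1 ≤ k)) = false by simp only [decide_eq_false_iff_not]; omega]
    have hcond := pv_cond_eq lines k hklt
    rw [hdrop, PySem.List.enumerate_cons, List.filter_cons]
    simp only at hcond
    rw [hcast, hcond, apply_ite (List.map Prod.snd), List.map_cons, hih, hp1, hp2, pvKeepRec]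
    cases hb : lines[k] == "" <;> cases hP1 : pvPB lines k 1 <;> cases hP2 : pvPB lines k 2 <;>
      simp [hb, hP1, hP2]

-- every line both loops see is an rstripped string (or the appended ''), so A's
-- strip-blank test coincides with B's ==''-blank test on it
lemma pv_lines_blank (base : List String) (hbase : ∀ x ∈ base, (PySem.Str.strip x == "") = (x == ""))
    (c : Bool) :
    ∀ l ∈ (if c then base ++ [""] else base), (PySem.Str.strip l == "") = (l == "") := by
  intro l hl
  cases c with
  | true =>
    rw [if_pos rfl] at hl
    rcases List.mem_append.mp hl with h | h
    · exact hbase l h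
    · rw [List.mem_singleton.mp h]; rfl
  | false =>
    rw [if_neg (by simp)] at hl
    exact hbase l hl

-- ===== VERDICT (by name: the statement is the Claim_ definition above) =====
theorem fix_common_issues_spec : Claim_equal_fix_common_issues := by
  intro content _
  unfold Spec_fix_common_issues fix_common_issues fix_common_issues_alt
  simp only
  generalize hL : (if !(((PySem.Str.split? content "\n").getD []).map PySem.Str.rstrip).isEmpty &&
      ((PySem.List.pyGet? (((PySem.Str.split? content "\n").getD []).map PySem.Str.rstrip) (-1)).getD "" != "")
    then ((PySem.Str.split? content "\n").getD []).map PySem.Str.rstrip ++ [""]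
    else ((PySem.Str.split? content "\n").getD []).map PySem.Str.rstrip) = L
  have hblank : ∀ l ∈ L, (PySem.Str.strip l == "") = (l == "") := by
    rw [← hL]
    exact pv_lines_blank _ (by
      intro x hx
      obtain ⟨y, _, rfl⟩ := List.mem_map.mp hx
      exact pv_strip_rstrip_beq y) _
  congr 1
  have hA : pvBlankLoop L 0 = pvKeepRec false false L :=
    pv_aloop_eq_keepRec L hblank 0 false false le_rfl (by simp) (by simp)
  have hB := pv_filt_eq_keepRec L L.length 0 (by omega)
  simp only [List.drop_zero, Nat.cast_zero] at hB
  have hpb1 : pvPB L 0 1 = false := by simp [pvPB]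
  have hpb2 : pvPB L 0 2 = false := by simp [pvPB]
  rw [hpb1, hpb2] at hB
  rw [hA, ← hB]
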